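-- pv_equiv track=rewrite | github.com/kyoungbinkim/LGEcodejam | 2024QualifyingRound1/d.py | calcRGB
-- ===== SOURCE A (Python) =====
-- cmap = {
--     'R': 0,
--     'G': 1,
--     'B': 2
-- }
--
-- def calcRGB(s):
--     before, slen = None, len(s)
--     cnts = [0 for _ in range(3)]
--     flags = [None for _ in range(3)]
--
--     for i, c in enumerate(s):
--         flags[cmap[c]] = flags[cmap[c]] if flags[cmap[c]] != None else False
--         if c != before:
--             if i < slen-1:
--                 if before == s[i+1]:
--                     flags[cmap[before]] = True
--             before = c
--         else:
--             cnts[cmap[c]] += 1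
--
--     ans = [0 for _ in range(3)]
--
--     for i in range(3):
--         if flags[i] == None:
--             ans[i] = cnts[i]
--         elif flags[i] == False:
--             ans[i] = cnts[i] + 1
--         else:
--             ans[i] = cnts[i] + 2
--     return ans, flags
-- ===== SOURCE B (Python) =====
-- from itertools import groupby
--
-- cmap = {
--     'R': 0,
--     'G': 1,
--     'B': 2
-- }
--
-- def calcRGB(s):
--     runs = [(c, sum(1 for _ in g)) for c, g in groupby(s)]
--
--     cnts = [0, 0, 0]
--     flags = [None, None, None]
--     for c, n in runs:
--         k = cmap[c]
--         if flags[k] is None: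
--             flags[k] = False
--         cnts[k] += n - 1
--
--     for j in range(len(runs) - 2):
--         if runs[j][0] == runs[j + 2][0] and runs[j + 1][1] == 1:
--             flags[cmap[runs[j][0]]] = True
--
--     ans = [cnts[i] + (0 if flags[i] is None else 1 if flags[i] is False else 2)
--            for i in range(3)]
--     return ans, flags
-- ===== Notes on version B (the rewrite author's own statement) =====
-- stated objective: alternative
-- what changed: B first builds the run-length encoding of s with itertools.groupby, then derives cnts from run lengths (n-1 per run), flags=False per appearing colour, and flags=True by scanning adjacent run triples (same flanking colour, middle run of length exactly 1), instead of A's single indexed character loop with one-character lookahead.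
import Mathlib
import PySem

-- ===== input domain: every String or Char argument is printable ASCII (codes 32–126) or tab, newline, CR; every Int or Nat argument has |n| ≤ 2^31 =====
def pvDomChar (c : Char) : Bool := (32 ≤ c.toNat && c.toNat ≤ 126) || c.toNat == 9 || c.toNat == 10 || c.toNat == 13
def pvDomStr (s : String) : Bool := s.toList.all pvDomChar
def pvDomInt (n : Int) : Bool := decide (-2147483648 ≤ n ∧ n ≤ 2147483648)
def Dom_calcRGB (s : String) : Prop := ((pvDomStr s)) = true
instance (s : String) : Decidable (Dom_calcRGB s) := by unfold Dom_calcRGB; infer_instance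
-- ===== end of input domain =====

-- B replaces A's indexed character loop (with one-char lookahead) by a run-length
-- encoding pass followed by a scan of adjacent run triples; alternative decomposition,
-- same asymptotic cost. Equality of RETURN values is what is proved.

-- ===== PORT A =====
def cmapL : PySem.Dict Char Int := PySem.Dict.ofList [('R', 0), ('G', 1), ('B', 2)]

def calcRGB (s : String) : List Int × List (Option Bool) :=
  let cs := s.toList
  let slen : Int := cs.length
  let st :=
    (PySem.List.enumerate cs 0).foldl
      (fun (st : Option Char × List Int × List (Option Bool)) ic =>
        let before := st.1; let cnts := st.2.1; let flags := st.2.2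
        let i := ic.1; let c := ic.2
        let k := cmapL.getD c 0
        let flags := PySem.List.pySetD flags k
          (if PySem.List.pyGetD flags k none ≠ none then PySem.List.pyGetD flags k none
           else some false)
        if some c ≠ before then
          let flags :=
            if i < slen - 1 then
              match before, PySem.List.pyGet? cs (i + 1) with
              | some b, some nxt =>
                  if b = nxt then PySem.List.pySetD flags (cmapL.getD b 0) (some true)
                  else flags
              | _, _ => flags
            else flags
          (some c, cnts, flags)
        else
          (before, PySem.List.pySetD cnts k (PySem.List.pyGetD cnts k 0 + 1), flags))
      (none, (List.range 3).map (fun _ => (0 : Int)),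
             (List.range 3).map (fun _ => (none : Option Bool)))
  let cnts := st.2.1; let flags := st.2.2
  let ans :=
    (PySem.List.pyRange 0 3 1).foldl
      (fun ans i =>
        let f := PySem.List.pyGetD flags i none
        PySem.List.pySetD ans i
          (if f = none then PySem.List.pyGetD cnts i 0
           else if f = some false then PySem.List.pyGetD cnts i 0 + 1
           else PySem.List.pyGetD cnts i 0 + 2))
      ((List.range 3).map (fun _ => (0 : Int)))
  (ans, flags)

-- ===== PORT B =====
-- itertools.groupby as left-to-right run-length encoding (run length as Python int)
def runsOf : List Char → List (Char × Int)
  | [] => []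
  | c :: rest =>
      (c, ((rest.takeWhile (· = c)).length : Int) + 1) ::
        runsOf (rest.dropWhile (· = c))
termination_by cs => cs.length
decreasing_by
  simp only [List.length_cons]
  exact Nat.lt_succ_of_le (List.length_dropWhile_le _ _)

-- the triple-window scan (for j in range(len(runs)-2): …)
def scanTrue (flags : List (Option Bool)) : List (Char × Int) → List (Option Bool)
  | (a, _) :: (b, m) :: (c, p) :: tl =>
      scanTrue
        (if a = c ∧ m = 1 then PySem.List.pySetD flags (cmapL.getD a 0) (some true)
         else flags)
        ((b, m) :: (c, p) :: tl)
  | _ => flags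

def calcRGB_alt (s : String) : List Int × List (Option Bool) :=
  let runs := runsOf s.toList
  let p :=
    runs.foldl
      (fun (p : List Int × List (Option Bool)) cn =>
        let cnts := p.1; let flags := p.2
        let c := cn.1; let n := cn.2
        let k := cmapL.getD c 0
        let flags :=
          if PySem.List.pyGetD flags k none = none then
            PySem.List.pySetD flags k (some false)
          else flags
        (PySem.List.pySetD cnts k (PySem.List.pyGetD cnts k 0 + (n - 1)), flags))
      ([0, 0, 0], [none, none, none])
  let cnts := p.1
  let flags := scanTrue p.2 runs
  let ans :=
    (PySem.List.pyRange 0 3 1).map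
      (fun i =>
        PySem.List.pyGetD cnts i 0 +
          (if PySem.List.pyGetD flags i none = none then 0
           else if PySem.List.pyGetD flags i none = some false then 1
           else 2))
  (ans, flags)

-- ===== PRECONDITION & SPEC =====
-- Pre_ excludes exactly the strings containing a character other than 'R','G','B':
-- on those A raises KeyError (cmap lookup), and B raises the same KeyError.
def Pre_calcRGB (s : String) : Prop :=
  (s.toList.all (fun c => c == 'R' || c == 'G' || c == 'B')) = true
instance (s : String) : Decidable (Pre_calcRGB s) := by unfold Pre_calcRGB; infer_instance

def pvWitness_calcRGB : String := "RGGBRB"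

def Spec_calcRGB (s : String) (out : List Int × List (Option Bool)) : Prop := out = calcRGB_alt s
instance (s : String) (out : List Int × List (Option Bool)) : Decidable (Spec_calcRGB s out) := by unfold Spec_calcRGB; infer_instance

-- ===== CLAIM (what is proved, stated in full; the proofs are below) =====
def Claim_equal_calcRGB : Prop := ∀ (s : String), Dom_calcRGB s → Pre_calcRGB s → Spec_calcRGB s (calcRGB s)

-- ===== LEMMAS AND PROOFS =====

-- ---- proof-side abbreviations ----

-- RGB characters (the only ones Pre_ admits)
def isRGB (c : Char) : Prop := c = 'R' ∨ c = 'G' ∨ c = 'B'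

def ix (c : Char) : Int := cmapL.getD c 0
def nx (c : Char) : Nat := (ix c).toNat

-- A's per-character state
def loopA : (Option Char × List Int × List (Option Bool)) → List Char →
    (Option Char × List Int × List (Option Bool))
  | st, [] => st
  | (before, cnts, flags), c :: rest =>
      let k := cmapL.getD c 0
      let flags' := PySem.List.pySetD flags k
        (if PySem.List.pyGetD flags k none ≠ none then PySem.List.pyGetD flags k none
         else some false)
      if some c ≠ before then
        let flags'' :=
          match before, rest with
          | some b, r :: _ =>
              if b = r then PySem.List.pySetD flags' (cmapL.getD b 0) (some true)
              else flags'
          | _, _ => flags'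
        loopA (some c, cnts, flags'') rest
      else
        loopA (before, PySem.List.pySetD cnts k (PySem.List.pyGetD cnts k 0 + 1), flags') rest

-- primitive state operations
def mF (c : Char) (fl : List (Option Bool)) : List (Option Bool) :=
  PySem.List.pySetD fl (ix c)
    (if PySem.List.pyGetD fl (ix c) none ≠ none then PySem.List.pyGetD fl (ix c) none
     else some false)
def sT (b : Char) (fl : List (Option Bool)) : List (Option Bool) :=
  PySem.List.pySetD fl (ix b) (some true)
def addN (cn : List Int) (c : Char) (m : Int) : List Int :=
  PySem.List.pySetD cn (ix c) (PySem.List.pyGetD cn (ix c) 0 + m)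

def tOpt (prev : Option Char) (n : Int) (hd : Option (Char × Int))
    (fl : List (Option Bool)) : List (Option Bool) :=
  match prev, (if n = 1 then hd else none) with
  | some b, some r => if b = r.1 then sT b fl else fl
  | _, _ => fl

def fl2Of (prev : Option Char) (c : Char) (n : Int) (tl : List (Char × Int))
    (flags : List (Option Bool)) : List (Option Bool) :=
  tOpt prev n tl.head? (mF c flags)

-- run-level single pass matching A's behaviour run by run
def go : Option Char → List Int → List (Option Bool) → List (Char × Int) →
    List Int × List (Option Bool)
  | _, cnts, flags, [] => (cnts, flags)
  | prev, cnts, flags, (c, n) :: rs =>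
      let fl1 := mF c flags
      let fl2 :=
        match prev, (if n = 1 then rs.head? else none) with
        | some b, some r => if b = r.1 then sT b fl1 else fl1
        | _, _ => fl1
      go (some c) (addN cnts c (n - 1)) fl2 rs

-- the three passes of B, run-level
def cFold : List (Char × Int) → List Int → List Int
  | [], cn => cn
  | (c, n) :: rs, cn => cFold rs (addN cn c (n - 1))
def fFold : List (Char × Int) → List (Option Bool) → List (Option Bool)
  | [], fl => fl
  | (c, _) :: rs, fl => fFold rs (mF c fl)
def applyT : Option Char → List (Char × Int) → List (Option Bool) → List (Option Bool)
  | _, [], fl => fl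
  | prev, (c, n) :: rs, fl => applyT (some c) rs (tOpt prev n rs.head? fl)

def flat (rs : List (Char × Int)) : List Char :=
  rs.flatMap (fun r => List.replicate r.2.toNat r.1)

-- ---- basic index facts ----

lemma nx_lt3 {c : Char} (h : isRGB c) : nx c < 3 := by
  rcases h with h | h | h <;> subst h <;> decide

lemma ix_toNat {c : Char} (h : isRGB c) : (ix c : Int) = (nx c : Nat) := by
  rcases h with h | h | h <;> subst h <;> decide

lemma nx_inj {b c : Char} (hb : isRGB b) (hc : isRGB c) (h : b ≠ c) : nx b ≠ nx c := by
  rcases hb with hb | hb | hb <;> rcases hc with hc | hc | hc <;> subst hb <;> subst hc <;>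
    first | (exact absurd rfl h) | decide

lemma pySetD_ix {α : Type} (fl : List α) {c : Char} (h : isRGB c) (v : α) :
    PySem.List.pySetD fl (ix c) v = fl.set (nx c) v := by
  rw [ix_toNat h]; simp

lemma pyGetD_ix {α : Type} (fl : List α) {c : Char} (h : isRGB c) (d : α) :
    PySem.List.pyGetD fl (ix c) d = fl.getD (nx c) d := by
  rw [ix_toNat h]; simp

lemma getD_set_self {α : Type} (xs : List α) {j : Nat} (h : j < xs.length) (v d : α) :
    (xs.set j v).getD j d = v := by
  simp [List.getD, h]

lemma getD_set_ne {α : Type} (xs : List α) {i j : Nat} (h : i ≠ j) (v d : α) :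
    (xs.set j v).getD i d = xs.getD i d := by
  simp [List.getD, List.getElem?_set_ne (Ne.symm h)]

lemma set_getD_self {α : Type} (xs : List α) {j : Nat} (h : j < xs.length) (d : α) :
    xs.set j (xs.getD j d) = xs := by
  have : xs.getD j d = xs[j] := by simp [List.getD, List.getElem?_eq_getElem h]
  rw [this, List.set_getElem_self]

-- ---- runsOf facts ----

lemma tw_rep (c : Char) (l : List Char) :
    l.takeWhile (· = c) = List.replicate (l.takeWhile (· = c)).length c := by
  apply List.eq_replicate_length.mpr
  intro b hb
  simpa using List.mem_takeWhile_imp hb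

lemma runsOf_flat (cs : List Char) : flat (runsOf cs) = cs := by
  induction cs using runsOf.induct with
  | case1 => rw [runsOf]; rfl
  | case2 c rest ih =>
      rw [runsOf]
      simp only [flat, List.flatMap_cons]
      have h1 : ((((rest.takeWhile (· = c)).length : Int) + 1)).toNat
          = (rest.takeWhile (· = c)).length + 1 := by omega
      rw [h1, List.replicate_succ]
      show c :: (List.replicate (rest.takeWhile (· = c)).length c ++ flat (runsOf (rest.dropWhile (· = c)))) = c :: rest
      rw [ih, ← tw_rep, List.takeWhile_append_dropWhile]

lemma runsOf_pos (cs : List Char) : ∀ r ∈ runsOf cs, 1 ≤ r.2 := by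
  induction cs using runsOf.induct with
  | case1 => simp [runsOf]
  | case2 c rest ih =>
      rw [runsOf]
      intro r hr
      rcases List.mem_cons.mp hr with h | h
      · subst h; simp only []; omega
      · exact ih r h

lemma runsOf_head (cs : List Char) : (runsOf cs).head?.map Prod.fst = cs.head? := by
  cases cs <;> rw [runsOf] <;> rfl

lemma runsOf_chain (cs : List Char) : (runsOf cs).IsChain (fun a b => a.1 ≠ b.1) := by
  induction cs using runsOf.induct with
  | case1 => simp [runsOf]
  | case2 c rest ih =>
      rw [runsOf]
      apply List.isChain_cons.mpr
      refine ⟨?_, ih⟩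
      intro y hy
      have hh : (runsOf (rest.dropWhile (· = c))).head?.map Prod.fst
          = (rest.dropWhile (· = c)).head? := runsOf_head _
      intro hcy
      have hy1 : (rest.dropWhile (· = c)).head? = some y.1 := by
        rw [← hh, hy]; rfl
      have := List.head?_dropWhile_not (fun x => decide (x = c)) rest
      rw [hy1] at this
      simp at this
      exact this hcy.symm

lemma runsOf_colors {cs : List Char} (h : ∀ c ∈ cs, isRGB c) :
    ∀ r ∈ runsOf cs, isRGB r.1 := by
  induction cs using runsOf.induct with
  | case1 => simp [runsOf]
  | case2 c rest ih =>
      rw [runsOf]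
      intro r hr
      rcases List.mem_cons.mp hr with hh | hh
      · subst hh; exact h c (by simp)
      · exact ih (fun x hx => h x (by
          have := List.dropWhile_sublist (l := rest) (p := (· = c))
          exact List.mem_cons_of_mem _ (this.mem hx))) r hh

-- ---- A side: fold over enumerate = loopA ----

lemma foldl_enum (suf pre : List Char) (st : Option Char × List Int × List (Option Bool)) :
    (PySem.List.enumerate suf (pre.length : Int)).foldl
      (fun (st : Option Char × List Int × List (Option Bool)) ic =>
        let before := st.1; let cnts := st.2.1; let flags := st.2.2
        let i := ic.1; let c := ic.2
        let k := cmapL.getD c 0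
        let flags := PySem.List.pySetD flags k
          (if PySem.List.pyGetD flags k none ≠ none then PySem.List.pyGetD flags k none
           else some false)
        if some c ≠ before then
          let flags :=
            if i < ((pre ++ suf).length : Int) - 1 then
              match before, PySem.List.pyGet? (pre ++ suf) (i + 1) with
              | some b, some nxt =>
                  if b = nxt then PySem.List.pySetD flags (cmapL.getD b 0) (some true)
                  else flags
              | _, _ => flags
            else flags
          (some c, cnts, flags)
        else
          (before, PySem.List.pySetD cnts k (PySem.List.pyGetD cnts k 0 + 1), flags)) st
    = loopA st suf := by
  induction suf generalizing pre st with
  | nil => rw [PySem.List.enumerate_nil]; rfl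
  | cons c rest ih =>
      obtain ⟨before, cnts, flags⟩ := st
      rw [PySem.List.enumerate_cons, List.foldl_cons]
      cases rest with
      | nil =>
          rw [PySem.List.enumerate_nil]
          simp only [List.foldl_nil, loopA]
          have hlt : ((pre.length : Int) < ((pre ++ [c]).length : Int) - 1) = False := by
            simp
          simp only [hlt, if_false]
      | cons r rest' =>
          have hlt : ((pre.length : Int) < ((pre ++ c :: r :: rest').length : Int) - 1) = True := by
            simp; omega
          have hget : PySem.List.pyGet? (pre ++ c :: r :: rest') ((pre.length : Int) + 1)
              = some r := by
            simpa using PySem.List.pyGet?_append_right pre (c :: r :: rest') 1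
          have harg : ((pre.length : Int) + 1) = ((pre ++ [c]).length : Int) := by simp
          have hfull : pre ++ c :: r :: rest' = (pre ++ [c]) ++ r :: rest' := by simp
          simp only [loopA, hlt, if_true, hget]
          cases before with
          | none =>
              simp only []
              rw [harg, hfull]
              exact ih (pre ++ [c]) _
          | some b =>
              by_cases h1 : some c ≠ some b
              · simp only [if_pos h1]
                by_cases h2 : b = r
                · simp only [if_pos h2]
                  rw [harg, hfull]
                  exact ih (pre ++ [c]) _
                · simp only [if_neg h2]
                  rw [harg, hfull]
                  exact ih (pre ++ [c]) _
              · simp only [if_neg h1]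
                rw [harg, hfull]
                exact ih (pre ++ [c]) _

-- ---- A side: loopA over a run decomposition = go ----

lemma loopA_inner (m : Nat) (c : Char) (hc : isRGB c) :
    ∀ (cnts : List Int) (flags : List (Option Bool)) (rest : List Char),
    cnts.length = 3 → flags.length = 3 →
    flags.getD (nx c) none ≠ none →
    loopA (some c, cnts, flags) (List.replicate m c ++ rest)
      = loopA (some c, addN cnts c m, flags) rest := by
  induction m with
  | zero =>
      intro cnts flags rest cnts_len flags_len hfl
      have h0 : addN cnts c ((0 : Nat) : Int) = cnts := by
        unfold addN
        rw [pySetD_ix _ hc, pyGetD_ix _ hc]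
        simp only [Nat.cast_zero, add_zero]
        exact set_getD_self _ (by rw [cnts_len]; exact nx_lt3 hc) _
      rw [List.replicate_zero, List.nil_append, h0]
  | succ m ihm =>
      intro cnts flags rest cnts_len flags_len hfl
      rw [List.replicate_succ, List.cons_append]
      have hstep : loopA (some c, cnts, flags) (c :: (List.replicate m c ++ rest))
          = loopA (some c, PySem.List.pySetD cnts (cmapL.getD c 0)
                (PySem.List.pyGetD cnts (cmapL.getD c 0) 0 + 1), flags)
              (List.replicate m c ++ rest) := by
        simp only [loopA]
        have hne : ¬ (some c ≠ some c) := by simp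
        rw [if_neg hne]
        have hfl' : PySem.List.pySetD flags (cmapL.getD c 0)
            (if PySem.List.pyGetD flags (cmapL.getD c 0) none ≠ none
             then PySem.List.pyGetD flags (cmapL.getD c 0) none else some false) = flags := by
          have hx : (cmapL.getD c 0) = ix c := rfl
          rw [hx, pyGetD_ix _ hc, pySetD_ix _ hc, if_pos hfl,
              set_getD_self _ (by rw [flags_len]; exact nx_lt3 hc)]
        rw [hfl']
      rw [hstep]
      have hlen' : (PySem.List.pySetD cnts (cmapL.getD c 0)
          (PySem.List.pyGetD cnts (cmapL.getD c 0) 0 + 1)).length = 3 := by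
        simp [cnts_len]
      rw [ihm _ _ _ hlen' flags_len hfl]
      have hx : (cmapL.getD c 0) = ix c := rfl
      have hval : addN (PySem.List.pySetD cnts (cmapL.getD c 0)
            (PySem.List.pyGetD cnts (cmapL.getD c 0) 0 + 1)) c ((m : Nat) : Int)
          = addN cnts c (((m + 1 : Nat)) : Int) := by
        unfold addN
        rw [hx]
        simp only [pySetD_ix _ hc, pyGetD_ix _ hc]
        rw [getD_set_self _ (by rw [cnts_len]; exact nx_lt3 hc), List.set_set]
        congr 1
        push_cast; ring
      rw [hval]

lemma mF_getD {flags : List (Option Bool)} {c : Char} (hc : isRGB c)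
    (flen : flags.length = 3) : (mF c flags).getD (nx c) none ≠ none := by
  unfold mF
  rw [pySetD_ix _ hc, getD_set_self _ (by rw [flen]; exact nx_lt3 hc)]
  split_ifs with h
  · exact h
  · simp

lemma fl2Of_len {prev : Option Char} {c : Char} {n : Int} {tl : List (Char × Int)}
    {flags : List (Option Bool)} (flen : flags.length = 3) :
    (fl2Of prev c n tl flags).length = 3 := by
  unfold fl2Of tOpt sT mF
  rcases prev with _ | b
  · simpa using flen
  · rcases (if n = 1 then tl.head? else none) with _ | r
    · simpa using flen
    · simp only []
      split_ifs <;> simpa using flen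

lemma loopA_run_step (c : Char) (n : Int) (prev : Option Char)
    (cnts : List Int) (flags : List (Option Bool)) (tl : List (Char × Int))
    (hc : isRGB c) (hn : 1 ≤ n)
    (hpos : ∀ r ∈ tl, 1 ≤ r.2)
    (hprev : ∀ b, prev = some b → isRGB b ∧ b ≠ c)
    (clen : cnts.length = 3) (flen : flags.length = 3) :
    loopA (prev, cnts, flags) (flat ((c, n) :: tl))
      = loopA (some c, addN cnts c (n - 1), fl2Of prev c n tl flags) (flat tl) := by
  have hrep : List.replicate n.toNat c = c :: List.replicate (n.toNat - 1) c := by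
    rw [← List.replicate_succ]; congr 1; omega
  have hflat : flat ((c, n) :: tl) = c :: (List.replicate (n.toNat - 1) c ++ flat tl) := by
    simp only [flat, List.flatMap_cons]
    rw [hrep]; rfl
  rw [hflat]
  simp only [loopA]
  have hcp : some c ≠ prev := by
    rcases prev with _ | b
    · simp
    · intro h
      injection h with h'
      exact (hprev b rfl).2 h'.symm
  rw [if_pos hcp]
  have hx : (cmapL.getD c 0) = ix c := rfl
  have hmf : PySem.List.pySetD flags (cmapL.getD c 0)
      (if PySem.List.pyGetD flags (cmapL.getD c 0) none ≠ none
       then PySem.List.pyGetD flags (cmapL.getD c 0) none else some false) = mF c flags := rfl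
  rw [hmf]
  by_cases hn1 : n = 1
  · subst hn1
    rw [show (1 : Int).toNat - 1 = 0 from rfl, List.replicate_zero, List.nil_append]
    have h0 : addN cnts c (1 - 1) = cnts := by
      unfold addN
      rw [pySetD_ix _ hc, pyGetD_ix _ hc]
      rw [show ((1 : Int) - 1) = 0 from rfl, add_zero]
      exact set_getD_self _ (by rw [clen]; exact nx_lt3 hc) _
    rw [h0]
    cases tl with
    | nil => cases prev <;> rfl
    | cons r2 tl2 =>
        have h2 : 1 ≤ r2.2 := hpos r2 (by simp)
        have hrep2 : List.replicate r2.2.toNat r2.1 = r2.1 :: List.replicate (r2.2.toNat - 1) r2.1 := by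
          rw [← List.replicate_succ]; congr 1; omega
        have hflat2 : flat (r2 :: tl2) = r2.1 :: (List.replicate (r2.2.toNat - 1) r2.1 ++ flat tl2) := by
          simp only [flat, List.flatMap_cons]
          rw [hrep2]; rfl
        rw [hflat2]
        cases prev <;> rfl
  · have hn2 : n.toNat - 1 = (n.toNat - 2) + 1 := by omega
    rw [hn2, List.replicate_succ, List.cons_append]
    have hfl2 : fl2Of prev c n tl flags = mF c flags := by
      unfold fl2Of tOpt; rw [if_neg hn1]; cases prev <;> rfl
    rw [hfl2]
    have hcast : ((n.toNat - 1 : Nat) : Int) = n - 1 := by omega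
    cases prev with
    | none =>
        simp only []
        rw [← List.cons_append, ← List.replicate_succ, ← hn2]
        rw [loopA_inner (n.toNat - 1) c hc cnts (mF c flags) (flat tl) clen
              (by unfold mF; simpa using flen) (mF_getD hc flen)]
        rw [hcast]
    | some b =>
        simp only []
        rw [if_neg (hprev b rfl).2]
        rw [← List.cons_append, ← List.replicate_succ, ← hn2]
        rw [loopA_inner (n.toNat - 1) c hc cnts (mF c flags) (flat tl) clen
              (by unfold mF; simpa using flen) (mF_getD hc flen)]
        rw [hcast]

lemma loopA_runs (rs : List (Char × Int)) :
    ∀ (prev : Option Char) (cnts : List Int) (flags : List (Option Bool)),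
    (∀ r ∈ rs, 1 ≤ r.2) → rs.IsChain (fun a b => a.1 ≠ b.1) →
    (∀ r ∈ rs, isRGB r.1) →
    (∀ b, prev = some b → isRGB b ∧ (∀ r, rs.head? = some r → b ≠ r.1)) →
    cnts.length = 3 → flags.length = 3 →
    (loopA (prev, cnts, flags) (flat rs)).2 = go prev cnts flags rs := by
  induction rs with
  | nil =>
      intro prev cnts flags _ _ _ _ _ _
      simp [flat, loopA, go]
  | cons r tl ih =>
      obtain ⟨c, n⟩ := r
      intro prev cnts flags hpos hchain hcolors hprev clen flen
      have hc : isRGB c := hcolors (c, n) (by simp)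
      have hn : 1 ≤ n := hpos (c, n) (by simp)
      have hprev' : ∀ b, prev = some b → isRGB b ∧ b ≠ c := by
        intro b hb
        exact ⟨(hprev b hb).1, (hprev b hb).2 (c, n) rfl⟩
      rw [loopA_run_step c n prev cnts flags tl hc hn
            (fun r hr => hpos r (List.mem_cons_of_mem _ hr)) hprev' clen flen]
      have hchain' := List.isChain_cons.mp hchain
      rw [ih (some c) (addN cnts c (n - 1)) (fl2Of prev c n tl flags)
            (fun r hr => hpos r (List.mem_cons_of_mem _ hr)) hchain'.2
            (fun r hr => hcolors r (List.mem_cons_of_mem _ hr))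
            (by
              intro b hb
              cases hb
              exact ⟨hc, fun r hr => hchain'.1 r (by rw [hr]; rfl)⟩)
            (by unfold addN; simp [clen])
            (fl2Of_len flen)]
      simp only [go]
      rfl

-- ---- B side: go = three passes ----

lemma fFold_sT (rs : List (Char × Int)) :
    ∀ (fl : List (Option Bool)) (b : Char), isRGB b → fl.length = 3 →
    (∀ r ∈ rs, isRGB r.1) →
    fFold rs (sT b fl) = sT b (fFold rs fl) := by
  induction rs with
  | nil => intro fl b _ _ _; rfl
  | cons r rs ih =>
      obtain ⟨c, n⟩ := r
      intro fl b hb flen hcol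
      have hc : isRGB c := hcol (c, n) (by simp)
      have hcomm : mF c (sT b fl) = sT b (mF c fl) := by
        by_cases hbc : b = c
        · subst hbc
          unfold mF sT
          have hx : (cmapL.getD b 0) = ix b := rfl
          rw [pySetD_ix _ hb, pySetD_ix _ hb, pySetD_ix _ hb, pySetD_ix _ hb,
              pyGetD_ix _ hb, pyGetD_ix _ hb]
          rw [getD_set_self _ (by rw [flen]; exact nx_lt3 hb)]
          simp only [List.set_set]
          split_ifs <;> simp_all
        · unfold mF sT
          rw [pySetD_ix _ hb, pySetD_ix _ hb, pySetD_ix _ hc, pySetD_ix _ hc,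
              pyGetD_ix _ hc, pyGetD_ix _ hc]
          rw [getD_set_ne _ (nx_inj hc hb (fun h => hbc h.symm))]
          exact (List.set_comm _ _ (nx_inj hc hb (fun h => hbc h.symm))).symm
      show fFold rs (mF c (sT b fl)) = sT b (fFold rs (mF c fl))
      rw [hcomm]
      exact ih (mF c fl) b hb (by unfold mF; simpa using flen)
        (fun r hr => hcol r (List.mem_cons_of_mem _ hr))

lemma fFold_tOpt (rs : List (Char × Int)) (prev : Option Char) (n : Int)
    (hd : Option (Char × Int)) (fl : List (Option Bool))
    (hb : ∀ b, prev = some b → isRGB b) (flen : fl.length = 3)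
    (hcol : ∀ r ∈ rs, isRGB r.1) :
    fFold rs (tOpt prev n hd fl) = tOpt prev n hd (fFold rs fl) := by
  unfold tOpt
  rcases prev with _ | b
  · rfl
  · rcases hif : (if n = 1 then hd else none) with _ | r
    · rfl
    · simp only []
      split_ifs
      · exact fFold_sT rs fl b (hb b rfl) flen hcol
      · rfl

lemma go_eq_passes (rs : List (Char × Int)) :
    ∀ (prev : Option Char) (cnts : List Int) (flags : List (Option Bool)),
    (∀ r ∈ rs, isRGB r.1) → flags.length = 3 →
    (∀ b, prev = some b → isRGB b) →
    go prev cnts flags rs = (cFold rs cnts, applyT prev rs (fFold rs flags)) := by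
  induction rs with
  | nil => intro prev cnts flags _ _ _; rfl
  | cons r rs ih =>
      obtain ⟨c, n⟩ := r
      intro prev cnts flags hcol flen hprevRGB
      have hc : isRGB c := hcol (c, n) (by simp)
      have hstep : go prev cnts flags ((c, n) :: rs)
          = go (some c) (addN cnts c (n - 1)) (fl2Of prev c n rs flags) rs := rfl
      rw [hstep, ih (some c) _ _ (fun r hr => hcol r (List.mem_cons_of_mem _ hr))
            (fl2Of_len flen) (fun b hb => by cases hb; exact hc)]
      have hfl : fFold rs (fl2Of prev c n rs flags)
          = tOpt prev n rs.head? (fFold rs (mF c flags)) := by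
        unfold fl2Of
        exact fFold_tOpt rs prev n rs.head? (mF c flags) hprevRGB
          (by unfold mF; simpa using flen)
          (fun r hr => hcol r (List.mem_cons_of_mem _ hr))
      show (cFold rs (addN cnts c (n - 1)), applyT (some c) rs (fFold rs (fl2Of prev c n rs flags)))
          = (cFold rs (addN cnts c (n - 1)),
             applyT (some c) rs (tOpt prev n rs.head? (fFold rs (mF c flags))))
      rw [hfl]

lemma scanTrue_eq_applyT (rs : List (Char × Int)) (fl : List (Option Bool)) :
    scanTrue fl rs = applyT none rs fl := by
  cases rs with
  | nil => rfl
  | cons r tl =>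
      obtain ⟨a, na⟩ := r
      show scanTrue fl ((a, na) :: tl) = applyT (some a) tl fl
      induction tl generalizing a na fl with
      | nil => rfl
      | cons r2 tl2 ih =>
          obtain ⟨b, m⟩ := r2
          cases tl2 with
          | nil =>
              by_cases hm : m = 1 <;> simp [scanTrue, applyT, tOpt, hm]
          | cons r3 tl3 =>
              obtain ⟨d, p⟩ := r3
              have hstep : scanTrue fl ((a, na) :: (b, m) :: (d, p) :: tl3)
                  = scanTrue
                      (if a = d ∧ m = 1 then PySem.List.pySetD fl (cmapL.getD a 0) (some true)
                       else fl) ((b, m) :: (d, p) :: tl3) := rfl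
              rw [hstep, ih _ b m]
              show applyT (some b) ((d, p) :: tl3)
                    (if a = d ∧ m = 1 then PySem.List.pySetD fl (cmapL.getD a 0) (some true)
                     else fl)
                  = applyT (some b) ((d, p) :: tl3) (tOpt (some a) m ((d, p) :: tl3).head? fl)
              congr 1
              by_cases hm : m = 1 <;> by_cases had : a = d <;>
                simp [tOpt, sT, ix, hm, had]

lemma bfold_eq_passes (rs : List (Char × Int)) :
    ∀ (cnts : List Int) (flags : List (Option Bool)),
    (∀ r ∈ rs, isRGB r.1) → flags.length = 3 →
    rs.foldl
      (fun (p : List Int × List (Option Bool)) cn =>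
        let cnts := p.1; let flags := p.2
        let c := cn.1; let n := cn.2
        let k := cmapL.getD c 0
        let flags :=
          if PySem.List.pyGetD flags k none = none then
            PySem.List.pySetD flags k (some false)
          else flags
        (PySem.List.pySetD cnts k (PySem.List.pyGetD cnts k 0 + (n - 1)), flags))
      (cnts, flags)
    = (cFold rs cnts, fFold rs flags) := by
  induction rs with
  | nil => intro cnts flags _ _; rfl
  | cons r rs ih =>
      obtain ⟨c, n⟩ := r
      intro cnts flags hcol flen
      have hc : isRGB c := hcol (c, n) (by simp)
      rw [List.foldl_cons]
      have hmfalt : (if PySem.List.pyGetD flags (cmapL.getD c 0) none = none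
            then PySem.List.pySetD flags (cmapL.getD c 0) (some false) else flags)
          = mF c flags := by
        unfold mF
        have hx : (cmapL.getD c 0) = ix c := rfl
        rw [hx]
        simp only [pySetD_ix _ hc, pyGetD_ix _ hc]
        by_cases h : flags.getD (nx c) none = none
        · rw [if_pos h, if_neg (not_not_intro h)]
        · rw [if_neg h, if_pos h]
          exact (set_getD_self _ (by rw [flen]; exact nx_lt3 hc) _).symm
      simp only []
      rw [hmfalt]
      exact ih _ _ (fun r hr => hcol r (List.mem_cons_of_mem _ hr))
        (by unfold mF; simpa using flen)

-- ---- length preservation ----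

lemma go_lengths (rs : List (Char × Int)) :
    ∀ prev cnts flags, cnts.length = 3 → flags.length = 3 →
    (go prev cnts flags rs).1.length = 3 ∧ (go prev cnts flags rs).2.length = 3 := by
  induction rs with
  | nil => intro prev cnts flags hcl hfl; exact ⟨hcl, hfl⟩
  | cons r rs ih =>
      obtain ⟨c, n⟩ := r
      intro prev cnts flags hcl hfl
      have hstep : go prev cnts flags ((c, n) :: rs)
          = go (some c) (addN cnts c (n - 1)) (fl2Of prev c n rs flags) rs := rfl
      rw [hstep]
      exact ih _ _ _ (by unfold addN; simpa using hcl) (fl2Of_len hfl)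

-- ---- final assembly ----

lemma ans_eq (cnts : List Int) (flags : List (Option Bool))
    (hc : cnts.length = 3) (hf : flags.length = 3) :
    (PySem.List.pyRange 0 3 1).foldl
      (fun ans i =>
        PySem.List.pySetD ans i
          (if PySem.List.pyGetD flags i none = none then PySem.List.pyGetD cnts i 0
           else if PySem.List.pyGetD flags i none = some false then
             PySem.List.pyGetD cnts i 0 + 1
           else PySem.List.pyGetD cnts i 0 + 2))
      [0, 0, 0]
    = (PySem.List.pyRange 0 3 1).map
        (fun i =>
          PySem.List.pyGetD cnts i 0 +
            (if PySem.List.pyGetD flags i none = none then 0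
             else if PySem.List.pyGetD flags i none = some false then 1
             else 2)) := by
  obtain ⟨x, y, z, rfl⟩ := List.length_eq_three.mp hc
  obtain ⟨f0, f1, f2, rfl⟩ := List.length_eq_three.mp hf
  have hr : PySem.List.pyRange 0 3 1 = [0, 1, 2] := by decide
  rw [hr]
  simp only [List.foldl_cons, List.foldl_nil, List.map_cons, List.map_nil]
  simp only [pysem]
  norm_num
  split_ifs <;> (try simp only [add_zero]) <;> rfl

theorem calcRGB_spec : Claim_equal_calcRGB := by
  intro s _hdom hpre
  unfold Spec_calcRGB
  have hall : ∀ c ∈ s.toList, isRGB c := by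
    intro c hc
    have h := List.all_eq_true.mp hpre c hc
    simp only [Bool.or_eq_true, beq_iff_eq] at h
    unfold isRGB
    tauto
  have hA := foldl_enum s.toList [] (none,
      (List.range 3).map (fun _ => (0 : Int)),
      (List.range 3).map (fun _ => (none : Option Bool)))
  simp only [List.nil_append, List.length_nil, Nat.cast_zero] at hA
  have hinit1 : (List.range 3).map (fun _ => (0 : Int)) = [0, 0, 0] := rfl
  have hinit2 : (List.range 3).map (fun _ => (none : Option Bool)) = [none, none, none] := rfl
  rw [hinit1, hinit2] at hA
  have hmain : (loopA (none, [0, 0, 0], [none, none, none]) s.toList).2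
      = go none [0, 0, 0] [none, none, none] (runsOf s.toList) := by
    conv_lhs => rw [← runsOf_flat s.toList]
    exact loopA_runs (runsOf s.toList) none _ _ (runsOf_pos _) (runsOf_chain _)
      (runsOf_colors hall) (fun b hb => by cases hb) rfl rfl
  have hgp : go none [0, 0, 0] [none, none, none] (runsOf s.toList)
      = (cFold (runsOf s.toList) [0, 0, 0],
         applyT none (runsOf s.toList) (fFold (runsOf s.toList) [none, none, none])) :=
    go_eq_passes (runsOf s.toList) none [0, 0, 0] [none, none, none]
      (runsOf_colors hall) rfl (fun b hb => by cases hb)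
  have hlen := go_lengths (runsOf s.toList) none [0, 0, 0] [none, none, none] rfl rfl
  rw [hgp] at hlen
  have hbf := bfold_eq_passes (runsOf s.toList) [0, 0, 0] [none, none, none]
      (runsOf_colors hall) rfl
  have hst := scanTrue_eq_applyT (runsOf s.toList) (fFold (runsOf s.toList) [none, none, none])
  simp only [calcRGB, calcRGB_alt]
  rw [hinit1, hinit2]
  rw [hA, hmain, hgp, hbf]
  simp only []
  rw [hst]
  exact Prod.ext (ans_eq _ _ hlen.1 hlen.2) rfl
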